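-- pv_equiv track=rewrite | github.com/hkm11495/CS261.HW1 | a1_p5_camel_case.py | input_cleanup
-- ===== SOURCE A (Python) =====
-- def length(input_string: str) -> int:
--     """    TODO: Write this implementation    """
--     count = 0
--     for i in input_string:
--         count +=1
--     return count
--
-- def input_cleanup(input_string: str) -> str:
--     """    TODO: Write this implementation    """
--     s = list(input_string)
--     strLength = length(input_string)
--     i = 0
--     # makes lower case
--     while i < strLength:
--         # convert to lower case if upper case
--         if ord(s[i]) >= 65:
--             if ord(s[i]) <= 90:
--                 s[i] = chr(ord(s[i]) + 32)
--
--         # convert characters to underscore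
--         if ord(s[i]) < 97 or ord(s[i]) > 122:
--             s[i] = '_'
--             # check for duplicate underscores
--             if i > 0 and strLength > 1:
--                 if s[i - 1] == '_':
--                     s.pop(i)
--                     strLength -= 1
--                     i -= 1
--
--         # check for leading underscores
--         if i == 0:
--             if ord(s[i]) == 95:
--                 s.pop(0)
--                 i -= 1
--                 strLength -= 1
--                 if strLength == 0:
--                     return ""
--
--         # check for trailing underscores
--         if i == strLength - 1:
--             if ord(s[i]) == 95:
--                 s.pop(strLength - 1)
--                 i -= 2
--                 strLength -= 1
--                 if strLength == 0:
--                     return ""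
--
--         # increment i
--         i += 1
--
--     # Make list into string
--     rString = ""
--
--     for i in s:
--         rString += i
--
--     return rString
-- ===== SOURCE B (Python) =====
-- def input_cleanup(input_string: str) -> str:
--     out = []
--     for c in input_string:
--         o = ord(c)
--         if 65 <= o <= 90:
--             out.append(chr(o + 32))
--         elif 97 <= o <= 122:
--             out.append(c)
--         elif out and out[-1] != '_':
--             out.append('_')
--     if out and out[-1] == '_':
--         out.pop()
--     return ''.join(out)
-- ===== Notes on version B (the rewrite author's own statement) =====
-- stated objective: simpler
-- what changed: A mutates a char list in place inside a while loop with index decrements and pop()-based deletion of duplicate/leading/trailing underscores; B is a single forward pass appending to an accumulator (lowering letters via ord, emitting '_' only when the accumulator is nonempty and does not already end in '_') followed by one trailing-underscore pop.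
import Mathlib
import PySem

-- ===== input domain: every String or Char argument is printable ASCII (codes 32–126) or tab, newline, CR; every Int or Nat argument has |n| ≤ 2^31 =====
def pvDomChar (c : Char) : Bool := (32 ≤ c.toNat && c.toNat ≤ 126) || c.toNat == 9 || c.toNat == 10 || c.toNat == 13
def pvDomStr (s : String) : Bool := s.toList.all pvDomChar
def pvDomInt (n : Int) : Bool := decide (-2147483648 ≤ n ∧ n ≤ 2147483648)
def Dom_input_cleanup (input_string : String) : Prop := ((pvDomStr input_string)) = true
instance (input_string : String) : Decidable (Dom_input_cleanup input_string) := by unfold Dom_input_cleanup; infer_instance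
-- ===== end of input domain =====

-- B replaces A's in-place while loop (index decrements, pop()-deletion of duplicate/leading/trailing
-- underscores) by one forward pass with an accumulator plus a single trailing pop; objective: simpler.

-- ===== PORT A =====

-- port of the module helper `length` (counting loop)
def pyLenPort (input_string : String) : Int :=
  input_string.toList.foldl (fun count _ => count + 1) 0

-- chr(ord(c) + 32)
def lowChar (c : Char) : Char := Char.ofNat (c.toNat + 32)

-- the "makes lower case" block of the loop body (s[i] read, conditional in-place set)
def stepLower (s : List Char) (i : Int) : List Char :=
  if 65 ≤ (PySem.List.pyGetD s i ' ').toNat then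
    if (PySem.List.pyGetD s i ' ').toNat ≤ 90 then
      PySem.List.pySetD s i (lowChar (PySem.List.pyGetD s i ' '))
    else s
  else s

-- the "convert characters to underscore" block (set + possible duplicate pop);
-- `none` marks the states where Python would raise IndexError (never reached from input_cleanup)
def stepUnd (s : List Char) (L i : Int) : Option (List Char × Int × Int) :=
  if (PySem.List.pyGetD s i ' ').toNat < 97 ∨ 122 < (PySem.List.pyGetD s i ' ').toNat then
    if 0 < i ∧ 1 < L then
      if PySem.List.pyGetD (PySem.List.pySetD s i '_') (i - 1) ' ' = '_' then
        match PySem.List.pop? (PySem.List.pySetD s i '_') i with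
        | none => none
        | some (_, s3) => some (s3, L - 1, i - 1)
      else some (PySem.List.pySetD s i '_', L, i)
    else some (PySem.List.pySetD s i '_', L, i)
  else some (s, L, i)

-- the "check for leading underscores" block; `.inl r` is the early `return ""`
def stepLead (s : List Char) (L i : Int) : Option (String ⊕ (List Char × Int × Int)) :=
  if i = 0 then
    if (PySem.List.pyGetD s i ' ').toNat = 95 then
      match PySem.List.pop? s 0 with
      | none => none
      | some (_, s2) => if L - 1 = 0 then some (.inl "") else some (.inr (s2, L - 1, i - 1))
    else some (.inr (s, L, i))
  else some (.inr (s, L, i))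

-- the "check for trailing underscores" block
def stepTrail (s : List Char) (L i : Int) : Option (String ⊕ (List Char × Int × Int)) :=
  if i = L - 1 then
    if (PySem.List.pyGetD s i ' ').toNat = 95 then
      match PySem.List.pop? s (L - 1) with
      | none => none
      | some (_, s2) => if L - 1 = 0 then some (.inl "") else some (.inr (s2, L - 1, i - 2))
    else some (.inr (s, L, i))
  else some (.inr (s, L, i))

-- one pass of the loop body: lowering, underscore conversion, leading and trailing checks in order
def icBody (s : List Char) (L i : Int) : Option (String ⊕ (List Char × Int × Int)) :=
  match stepUnd (stepLower s i) L i with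
  | none => none
  | some (s2, L2, i2) =>
    match stepLead s2 L2 i2 with
    | none => none
    | some (.inl r) => some (.inl r)
    | some (.inr (s3, L3, i3)) => stepTrail s3 L3 i3

-- A's while loop; icBody's `none` marks Python IndexErrors, unreachable from input_cleanup.
-- The fuel argument only makes the recursion structural; input_cleanup passes more fuel than the
-- loop can consume (2·len+1; each iteration strictly decreases (L-i).toNat + len s — proved in loop_eq)
def icLoop : Nat → List Char → Int → Int → String
  | 0, _, _, _ => ""
  | fuel + 1, s, L, i =>
    if i < L then
      match icBody s L i with
      | none => ""
      | some (.inl r) => r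
      | some (.inr (s4, L4, i4)) => icLoop fuel s4 L4 (i4 + 1)
    else
      -- rString accumulation loop
      String.mk (s.foldl (fun rString c => rString ++ [c]) [])

def input_cleanup (input_string : String) : String :=
  icLoop (2 * input_string.toList.length + 1) input_string.toList (pyLenPort input_string) 0

-- ===== PORT B =====

-- loop body of Source B: append lowered letter / letter / guarded '_'
def bStep (out : List Char) (c : Char) : List Char :=
  if 65 ≤ c.toNat ∧ c.toNat ≤ 90 then out ++ [Char.ofNat (c.toNat + 32)]
  else if 97 ≤ c.toNat ∧ c.toNat ≤ 122 then out ++ [c]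
  else if out ≠ [] ∧ out.getLast? ≠ some '_' then out ++ ['_']
  else out

-- Source B on a char list: single pass, then one trailing pop, then join
def bCore (l : List Char) : List Char :=
  if (l.foldl bStep []).getLast? = some '_' then (l.foldl bStep []).dropLast
  else l.foldl bStep []

def input_cleanup_alt (input_string : String) : String :=
  String.mk (bCore input_string.toList)

-- ===== PRECONDITION & SPEC =====
def Spec_input_cleanup (input_string : String) (out : String) : Prop := out = input_cleanup_alt input_string
instance (input_string : String) (out : String) : Decidable (Spec_input_cleanup input_string out) := by unfold Spec_input_cleanup; infer_instance

-- ===== CLAIM (what is proved, stated in full; the proofs are below) =====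
def Claim_equal_input_cleanup : Prop := ∀ (input_string : String), Dom_input_cleanup input_string → Spec_input_cleanup input_string (input_cleanup input_string)

-- ===== LEMMAS AND PROOFS =====

-- one unfolding of the loop, phrased through the block equations
theorem icLoop_exit (n : Nat) (s : List Char) (L i : Int) (h : ¬ i < L) :
    icLoop (n + 1) s L i = String.mk (s.foldl (fun rString c => rString ++ [c]) []) := by
  rw [icLoop, if_neg h]

theorem icBody_eq {s : List Char} {L i : Int}
    {s2 : List Char} {L2 i2 : Int} {s3 : List Char} {L3 i3 : Int}
    (h2 : stepUnd (stepLower s i) L i = some (s2, L2, i2))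
    (h3 : stepLead s2 L2 i2 = some (.inr (s3, L3, i3))) :
    icBody s L i = stepTrail s3 L3 i3 := by
  unfold icBody
  rw [h2]
  dsimp only
  rw [h3]

theorem icBody_eq_early {s : List Char} {L i : Int}
    {s2 : List Char} {L2 i2 : Int} {res : String}
    (h2 : stepUnd (stepLower s i) L i = some (s2, L2, i2))
    (h3 : stepLead s2 L2 i2 = some (.inl res)) :
    icBody s L i = some (.inl res) := by
  unfold icBody
  rw [h2]
  dsimp only
  rw [h3]

theorem icLoop_step (n : Nat) (s : List Char) (L i : Int) (h : i < L)
    {s4 : List Char} {L4 i4 : Int}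
    (hb : icBody s L i = some (.inr (s4, L4, i4))) :
    icLoop (n + 1) s L i = icLoop n s4 L4 (i4 + 1) := by
  rw [icLoop, if_pos h, hb]

theorem icLoop_early (n : Nat) (s : List Char) (L i : Int) (h : i < L) {res : String}
    (hb : icBody s L i = some (.inl res)) :
    icLoop (n + 1) s L i = res := by
  rw [icLoop, if_pos h, hb]


theorem len_foldl (l : List Char) (n : Int) :
    l.foldl (fun c _ => c + 1) n = n + l.length := by
  induction l generalizing n with
  | nil => simp
  | cons x xs ih => rw [List.foldl_cons, ih]; simp [List.length_cons]; omega

-- ----- list decomposition helpers -----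

theorem pyGetD_mid (p : List Char) (c : Char) (r : List Char) (d : Char) :
    PySem.List.pyGetD (p ++ c :: r) (p.length : Int) d = c := by
  rw [PySem.List.pyGetD_natCast]
  simp [List.getD_eq_getElem?_getD, List.getElem?_append_right (le_refl p.length)]

theorem pySetD_mid (p : List Char) (c : Char) (r : List Char) (v : Char) :
    PySem.List.pySetD (p ++ c :: r) (p.length : Int) v = p ++ v :: r := by
  rw [PySem.List.pySetD_natCast]
  rw [List.set_append_right _ _ (le_refl p.length)]
  simp

theorem pyGetD_mid_pred (p : List Char) (c : Char) (r : List Char) (d : Char) (hp : p ≠ []) :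
    PySem.List.pyGetD (p ++ c :: r) ((p.length : Int) - 1) d = p.getLast hp := by
  have h1 : p.length - 1 < p.length := by
    cases p with | nil => exact absurd rfl hp | cons a as => simp
  have hcast : ((p.length : Int) - 1) = ((p.length - 1 : Nat) : Int) := by
    cases p with | nil => exact absurd rfl hp | cons a as => simp only [List.length_cons]; omega
  rw [hcast, PySem.List.pyGetD_natCast]
  rw [List.getD_eq_getElem?_getD, List.getElem?_append_left (by omega)]
  simp [List.getElem?_eq_getElem h1, List.getLast_eq_getElem]

theorem erase_mid (p : List Char) (c : Char) (r : List Char) :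
    (p ++ c :: r).eraseIdx p.length = p ++ r := by
  induction p with
  | nil => simp
  | cons a as ih => simp [List.eraseIdx_cons_succ, ih]

theorem pop_mid (p : List Char) (c : Char) (r : List Char) :
    PySem.List.pop? (p ++ c :: r) (p.length : Int) = some (c, p ++ r) := by
  have h : p.length < (p ++ c :: r).length := by simp
  rw [PySem.List.pop?_natCast _ _ h]
  rw [erase_mid]
  congr 1
  rw [Prod.mk.injEq]
  refine ⟨?_, rfl⟩
  rw [List.getElem_append_right (le_refl p.length)]
  simp

theorem take_mid (p : List Char) (c : Char) (r : List Char) :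
    (p ++ c :: r).take (p.length + 1) = p ++ [c] := by
  induction p with
  | nil => simp
  | cons a as ih => simp [List.take_succ_cons] at ih ⊢; exact ih

theorem decomp_of_lt (s : List Char) (i : Nat) (h : i < s.length) :
    s = s.take i ++ s[i] :: s.drop (i + 1) := by
  conv_lhs => rw [← List.take_append_drop i s]
  rw [List.getElem_cons_drop h]

-- ----- A's per-block equations on the decomposed state -----

-- lowc c is what the lowering block leaves at position i
def lowc (c : Char) : Char :=
  if 65 ≤ c.toNat then (if c.toNat ≤ 90 then lowChar c else c) else c

theorem stepLower_eq (p : List Char) (c : Char) (r : List Char) :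
    stepLower (p ++ c :: r) (p.length : Int) = p ++ lowc c :: r := by
  unfold stepLower lowc
  rw [pyGetD_mid]
  split_ifs <;> simp [pySetD_mid]

theorem stepUnd_letter (p : List Char) (c : Char) (r : List Char) (L : Int)
    (h : ¬(c.toNat < 97 ∨ 122 < c.toNat)) :
    stepUnd (p ++ c :: r) L (p.length : Int) = some (p ++ c :: r, L, (p.length : Int)) := by
  unfold stepUnd
  rw [pyGetD_mid, if_neg h]

theorem stepUnd_i0 (c : Char) (r : List Char) (L : Int)
    (h : c.toNat < 97 ∨ 122 < c.toNat) :
    stepUnd (c :: r) L 0 = some ('_' :: r, L, 0) := by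
  unfold stepUnd
  have h0 : PySem.List.pyGetD (([] : List Char) ++ c :: r) ((List.length ([] : List Char) : Nat) : Int) ' ' = c := pyGetD_mid [] c r ' '
  simp only [List.nil_append, List.length_nil, Nat.cast_zero] at h0
  rw [h0, if_pos h, if_neg (by omega)]
  have hs : PySem.List.pySetD (([] : List Char) ++ c :: r) ((List.length ([] : List Char) : Nat) : Int) '_' = [] ++ '_' :: r := pySetD_mid [] c r '_'
  simp only [List.nil_append, List.length_nil, Nat.cast_zero] at hs
  rw [hs]

theorem stepUnd_nodup (p : List Char) (c : Char) (r : List Char) (L : Int)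
    (hc : c.toNat < 97 ∨ 122 < c.toNat) (hp : p ≠ []) (hL : 1 < L)
    (hlast : p.getLast hp ≠ '_') :
    stepUnd (p ++ c :: r) L (p.length : Int) = some (p ++ '_' :: r, L, (p.length : Int)) := by
  unfold stepUnd
  rw [pyGetD_mid, if_pos hc, pySetD_mid]
  rw [if_pos ⟨by cases p with | nil => exact absurd rfl hp | cons a as => simp, hL⟩]
  rw [pyGetD_mid_pred p '_' r ' ' hp, if_neg hlast]

theorem stepUnd_dup (p : List Char) (c : Char) (r : List Char) (L : Int)
    (hc : c.toNat < 97 ∨ 122 < c.toNat) (hp : p ≠ []) (hL : 1 < L)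
    (hlast : p.getLast hp = '_') :
    stepUnd (p ++ c :: r) L (p.length : Int) = some (p ++ r, L - 1, (p.length : Int) - 1) := by
  unfold stepUnd
  rw [pyGetD_mid, if_pos hc, pySetD_mid]
  rw [if_pos ⟨by cases p with | nil => exact absurd rfl hp | cons a as => simp, hL⟩]
  rw [pyGetD_mid_pred p '_' r ' ' hp, if_pos hlast, pop_mid]

theorem stepLead_skip (s : List Char) (L i : Int) (h : i ≠ 0) :
    stepLead s L i = some (.inr (s, L, i)) := by
  unfold stepLead; rw [if_neg h]

theorem stepLead_zero_ne (c : Char) (r : List Char) (L : Int) (h : c.toNat ≠ 95) :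
    stepLead (c :: r) L 0 = some (.inr (c :: r, L, 0)) := by
  unfold stepLead
  rw [if_pos rfl, PySem.List.pyGetD_zero_cons, if_neg h]

theorem stepLead_pop (r : List Char) (L : Int) (hL : L - 1 ≠ 0) :
    stepLead ('_' :: r) L 0 = some (.inr (r, L - 1, -1)) := by
  unfold stepLead
  rw [if_pos rfl, PySem.List.pyGetD_zero_cons, if_pos (by decide), PySem.List.pop?_zero_cons]
  dsimp only
  rw [if_neg hL]
  norm_num

theorem stepLead_pop_end (r : List Char) (L : Int) (hL : L - 1 = 0) :
    stepLead ('_' :: r) L 0 = some (.inl "") := by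
  unfold stepLead
  rw [if_pos rfl, PySem.List.pyGetD_zero_cons, if_pos (by decide), PySem.List.pop?_zero_cons]
  dsimp only
  rw [if_pos hL]

theorem stepTrail_skip (s : List Char) (L i : Int) (h : i ≠ L - 1) :
    stepTrail s L i = some (.inr (s, L, i)) := by
  unfold stepTrail; rw [if_neg h]

theorem stepTrail_ne (p : List Char) (c : Char) (r : List Char) (L : Int)
    (h : (p.length : Int) = L - 1) (hc : c.toNat ≠ 95) :
    stepTrail (p ++ c :: r) L (p.length : Int) = some (.inr (p ++ c :: r, L, (p.length : Int))) := by
  unfold stepTrail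
  rw [if_pos h, pyGetD_mid, if_neg hc]

theorem stepTrail_pop (p : List Char) (L : Int)
    (hL : (p.length : Int) = L - 1) (h0 : L - 1 ≠ 0) :
    stepTrail (p ++ ['_']) L (p.length : Int) = some (.inr (p, L - 1, (p.length : Int) - 2)) := by
  unfold stepTrail
  rw [if_pos hL, pyGetD_mid p '_' [] ' ', if_pos (by decide), ← hL, pop_mid p '_' []]
  dsimp only
  rw [List.append_nil, hL, if_neg h0]

-- ----- B-side character classes and step facts -----

theorem toNat_lowChar (c : Char) (h : c.toNat ≤ 90) : (lowChar c).toNat = c.toNat + 32 := by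
  unfold lowChar
  have hv : Nat.isValidChar (c.toNat + 32) := Or.inl (by omega)
  rw [Char.ofNat, dif_pos hv]
  rfl

-- the per-character class B's step depends on
def cls (c : Char) : Char :=
  if 65 ≤ c.toNat ∧ c.toNat ≤ 90 then Char.ofNat (c.toNat + 32)
  else if 97 ≤ c.toNat ∧ c.toNat ≤ 122 then c
  else '_'

theorem toNat_und : ('_' : Char).toNat = 95 := by decide

theorem lowc_not_upper (c : Char) : ¬(65 ≤ (lowc c).toNat ∧ (lowc c).toNat ≤ 90) := by
  unfold lowc
  by_cases h1 : 65 ≤ c.toNat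
  · by_cases h2 : c.toNat ≤ 90
    · rw [if_pos h1, if_pos h2, toNat_lowChar c h2]; omega
    · rw [if_pos h1, if_neg h2]; omega
  · rw [if_neg h1]; omega

theorem cls_lowc (c : Char) : cls (lowc c) = cls c := by
  by_cases h1 : 65 ≤ c.toNat ∧ c.toNat ≤ 90
  · have hl : lowc c = lowChar c := by unfold lowc; rw [if_pos h1.1, if_pos h1.2]
    have ht : (lowChar c).toNat = c.toNat + 32 := toNat_lowChar c h1.2
    unfold cls
    rw [hl, if_neg (by omega), if_pos (by omega), if_pos h1]
    unfold lowChar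
    rfl
  · have hl : lowc c = c := by
      unfold lowc
      by_cases h2 : 65 ≤ c.toNat
      · rw [if_pos h2, if_neg (by omega)]
      · rw [if_neg h2]
    rw [hl]

theorem cls_und_of_not_letter (c : Char)
    (h : ¬(97 ≤ (lowc c).toNat ∧ (lowc c).toNat ≤ 122)) : cls c = '_' := by
  have hnu := lowc_not_upper c
  by_cases h1 : 65 ≤ c.toNat ∧ c.toNat ≤ 90
  · exfalso
    have hl : lowc c = lowChar c := by unfold lowc; rw [if_pos h1.1, if_pos h1.2]
    rw [hl, toNat_lowChar c h1.2] at h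
    omega
  · have hl : lowc c = c := by
      unfold lowc
      by_cases h2 : 65 ≤ c.toNat
      · rw [if_pos h2, if_neg (by push_neg at h1; omega)]
      · rw [if_neg h2]
    rw [hl] at h
    unfold cls
    rw [if_neg h1, if_neg h]

theorem bStep_cls (a : List Char) (c : Char) : bStep a c = bStep a (cls c) := by
  have h95 : ('_' : Char).toNat = 95 := rfl
  by_cases h1 : 65 ≤ c.toNat ∧ c.toNat ≤ 90
  · have ht : (Char.ofNat (c.toNat + 32)).toNat = c.toNat + 32 := toNat_lowChar c h1.2
    have hcls : cls c = Char.ofNat (c.toNat + 32) := by unfold cls; rw [if_pos h1]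
    rw [hcls]
    have lhs : bStep a c = a ++ [Char.ofNat (c.toNat + 32)] := by unfold bStep; rw [if_pos h1]
    have rhs : bStep a (Char.ofNat (c.toNat + 32)) = a ++ [Char.ofNat (c.toNat + 32)] := by
      unfold bStep
      rw [if_neg (by omega), if_pos (by omega)]
    rw [lhs, rhs]
  · by_cases h2 : 97 ≤ c.toNat ∧ c.toNat ≤ 122
    · have hcls : cls c = c := by unfold cls; rw [if_neg h1, if_pos h2]
      rw [hcls]
    · have hcls : cls c = '_' := by unfold cls; rw [if_neg h1, if_neg h2]
      rw [hcls]
      have key : ∀ d : Char, ¬(65 ≤ d.toNat ∧ d.toNat ≤ 90) → ¬(97 ≤ d.toNat ∧ d.toNat ≤ 122) →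
          bStep a d = if a ≠ [] ∧ a.getLast? ≠ some '_' then a ++ ['_'] else a := by
        intro d hd1 hd2
        unfold bStep
        rw [if_neg hd1, if_neg hd2]
      rw [key c h1 h2, key '_' (by rw [h95]; omega) (by rw [h95]; omega)]

theorem bStep_letter (a : List Char) (c : Char) (h : 97 ≤ c.toNat ∧ c.toNat ≤ 122) :
    bStep a c = a ++ [c] := by
  unfold bStep
  rw [if_neg (by omega), if_pos h]

theorem bStep_und_nil : bStep [] '_' = [] := by decide

theorem bStep_und_last (a : List Char) (h : a.getLast? = some '_') : bStep a '_' = a := by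
  unfold bStep
  rw [if_neg (by rw [toNat_und]; omega), if_neg (by rw [toNat_und]; omega)]
  rw [if_neg (by simp [h])]

theorem bStep_und_app (a : List Char) (h1 : a ≠ []) (h2 : a.getLast? ≠ some '_') :
    bStep a '_' = a ++ ['_'] := by
  unfold bStep
  rw [if_neg (by rw [toNat_und]; omega), if_neg (by rw [toNat_und]; omega)]
  rw [if_pos ⟨h1, h2⟩]

-- ----- the cleanliness invariant for the already-processed prefix -----

def CleanPre (p : List Char) : Prop :=
  (∀ x ∈ p, (97 ≤ x.toNat ∧ x.toNat ≤ 122) ∨ x = '_') ∧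
  p.head? ≠ some '_' ∧
  List.IsChain (fun a b => ¬(a = '_' ∧ b = '_')) p

theorem cleanPre_nil : CleanPre [] := by
  refine ⟨by simp, by simp, by simp⟩

theorem cleanPre_of_prefix {p q : List Char} (h : p <+: q) (hq : CleanPre q) : CleanPre p := by
  obtain ⟨t, rfl⟩ := h
  refine ⟨fun x hx => hq.1 x (List.mem_append_left t hx), ?_, List.IsChain.left_of_append hq.2.2⟩
  intro hh
  apply hq.2.1
  cases p with
  | nil => simp at hh
  | cons a as => simpa using hh

theorem cleanPre_append_letter {p : List Char} (h : CleanPre p) (c : Char)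
    (hc : 97 ≤ c.toNat ∧ c.toNat ≤ 122) : CleanPre (p ++ [c]) := by
  have hcne : c ≠ '_' := by
    intro heq; rw [heq, toNat_und] at hc; omega
  refine ⟨?_, ?_, ?_⟩
  · intro x hx
    rcases List.mem_append.mp hx with hx | hx
    · exact h.1 x hx
    · simp at hx; subst hx; exact Or.inl hc
  · cases p with
    | nil => simpa using hcne
    | cons a as => simpa using h.2.1
  · rw [List.isChain_append]
    refine ⟨h.2.2, by simp, ?_⟩
    intro x _ y hy
    simp at hy; subst hy
    exact fun hcon => hcne hcon.2

theorem cleanPre_append_und {p : List Char} (h : CleanPre p) (hp : p ≠ [])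
    (hl : p.getLast? ≠ some '_') : CleanPre (p ++ ['_']) := by
  refine ⟨?_, ?_, ?_⟩
  · intro x hx
    rcases List.mem_append.mp hx with hx | hx
    · exact h.1 x hx
    · simp at hx; subst hx; exact Or.inr rfl
  · cases p with
    | nil => exact absurd rfl hp
    | cons a as => simpa using h.2.1
  · rw [List.isChain_append]
    refine ⟨h.2.2, by simp, ?_⟩
    intro x hx y hy
    simp at hy; subst hy
    intro hcon
    exact hl (by rw [hx, hcon.1])

theorem cleanPre_len2 {p : List Char} (h : CleanPre p) (hl : p.getLast? = some '_') :
    2 ≤ p.length := by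
  cases p with
  | nil => simp at hl
  | cons a as =>
    cases as with
    | nil =>
      exfalso
      simp at hl
      exact h.2.1 (by simp [hl])
    | cons b bs => simp

-- a clean prefix passes through B's fold unchanged
theorem clean_foldl {p : List Char} (h : CleanPre p) : p.foldl bStep [] = p := by
  induction p using List.reverseRecOn with
  | nil => simp
  | append_singleton q c ih =>
    have hq : CleanPre q := cleanPre_of_prefix ⟨[c], rfl⟩ h
    rw [List.foldl_append, List.foldl_cons, List.foldl_nil, ih hq]
    have := h.1 c (by simp)
    rcases this with hc | hc
    · exact bStep_letter q c hc
    · subst hc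
      have hqne : q ≠ [] := by
        intro he; subst he
        exact h.2.1 (by simp)
      have hql : q.getLast? ≠ some '_' := by
        intro he
        have h2 := h.2.2
        rw [List.isChain_append] at h2
        exact h2.2.2 '_' he '_' (by simp) ⟨rfl, rfl⟩
      exact bStep_und_app q hqne hql

-- bCore is blind to the collapsing rewrites A performs
theorem bCore_mid_cls (p : List Char) (c c' : Char) (r : List Char) (h : cls c = cls c') :
    bCore (p ++ c :: r) = bCore (p ++ c' :: r) := by
  unfold bCore
  rw [List.foldl_append, List.foldl_append, List.foldl_cons, List.foldl_cons]
  rw [bStep_cls _ c, bStep_cls _ c', h]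

theorem bCore_cons_und (r : List Char) : bCore ('_' :: r) = bCore r := by
  unfold bCore
  rw [List.foldl_cons, bStep_und_nil]

theorem bCore_snoc_und (l : List Char) : bCore (l ++ ['_']) = bCore l := by
  unfold bCore
  rw [List.foldl_append, List.foldl_cons, List.foldl_nil]
  by_cases h1 : (l.foldl bStep []) = []
  · rw [h1]; simp [bStep_und_nil]
  · by_cases h2 : (l.foldl bStep []).getLast? = some '_'
    · rw [bStep_und_last _ h2]
    · rw [bStep_und_app _ h1 h2]
      rw [List.getLast?_concat, if_pos rfl, List.dropLast_concat, if_neg h2]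

theorem bCore_mid_dup (p : List Char) (r : List Char) (hc : CleanPre p)
    (hl : p.getLast? = some '_') :
    bCore (p ++ '_' :: r) = bCore (p ++ r) := by
  unfold bCore
  rw [List.foldl_append, List.foldl_append, List.foldl_cons, clean_foldl hc, bStep_und_last p hl]

-- B's result on a fully clean list with no trailing underscore is itself
theorem bCore_clean {p : List Char} (h : CleanPre p) (hl : p.getLast? ≠ some '_') :
    bCore p = p := by
  unfold bCore
  rw [clean_foldl h, if_neg hl]

-- ----- the main loop invariant -----

theorem loop_eq (n : Nat) : ∀ (s : List Char) (i : Nat),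
    2 * s.length - i < n → i ≤ s.length → CleanPre (s.take i) →
    ((s.take i).getLast? = some '_' → i < s.length) →
    icLoop n s (s.length : Int) (i : Int) = String.mk (bCore s) := by
  induction n with
  | zero =>
    intro s i hm hi hc hlast
    exact absurd hm (Nat.not_lt_zero _)
  | succ n ih =>
    intro s i hm hi hc hlast
    by_cases hlt : i < s.length
    swap
    · -- loop exit
      have hieq : i = s.length := by omega
      rw [icLoop_exit _ _ _ _ (by omega), PySem.List.foldl_append_singleton, List.nil_append]
      subst hieq
      rw [List.take_length] at hc hlast
      have hnl : s.getLast? ≠ some '_' := fun h => absurd (hlast h) (by omega)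
      rw [bCore_clean hc hnl]
    · -- loop body
      set p := s.take i with hp
      set c := s[i] with hcdef
      set r := s.drop (i + 1) with hr
      have hplen : p.length = i := by
        rw [hp, List.length_take]; omega
      have hsdec : s = p ++ c :: r := decomp_of_lt s i hlt
      have hslen : s.length = i + 1 + r.length := by
        conv_lhs => rw [hsdec]
        simp [hplen]
        omega
      have hguard : ((i : Nat) : Int) < (s.length : Int) := by push_cast; omega
      have hlow : stepLower s (i : Int) = p ++ lowc c :: r := by
        conv_lhs => rw [hsdec, ← hplen]
        exact stepLower_eq p c r
      by_cases hL : 97 ≤ (lowc c).toNat ∧ (lowc c).toNat ≤ 122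
      · -- letter: no underscore logic fires
        have hund : stepUnd (stepLower s ↑i) (↑s.length) ↑i = some (p ++ lowc c :: r, ↑s.length, ((i : Nat) : Int)) := by
          rw [hlow, ← hplen]
          exact stepUnd_letter p (lowc c) r _ (by omega)
        have hlead : stepLead (p ++ lowc c :: r) (↑s.length) ((i : Nat) : Int) =
            some (.inr (p ++ lowc c :: r, ↑s.length, ((i : Nat) : Int))) := by
          by_cases hi0 : i = 0
          · have hpnil : p = [] := by rw [hp, hi0, List.take_zero]
            subst hi0
            rw [hpnil]
            simp only [List.nil_append, Nat.cast_zero]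
            exact stepLead_zero_ne (lowc c) r _ (by omega)
          · exact stepLead_skip _ _ _ (by exact_mod_cast hi0)
        have htrail : stepTrail (p ++ lowc c :: r) (↑s.length) ((i : Nat) : Int) =
            some (.inr (p ++ lowc c :: r, ↑s.length, ((i : Nat) : Int))) := by
          by_cases hend : ((i : Nat) : Int) = (s.length : Int) - 1
          · rw [← hplen] at hend ⊢
            exact stepTrail_ne p (lowc c) r _ hend (by omega)
          · exact stepTrail_skip _ _ _ hend
        rw [icLoop_step n s _ _ hguard ((icBody_eq hund hlead).trans htrail)]
        have hres : bCore (p ++ lowc c :: r) = bCore s := by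
          conv_rhs => rw [hsdec]
          exact bCore_mid_cls p _ c r (cls_lowc c)
        rw [← hres]
        have hlen' : (s.length : Int) = (((p ++ lowc c :: r).length : Nat) : Int) := by
          simp [hplen]
          omega
        have hcast : (((i : Nat) : Int) + 1) = (((i + 1 : Nat) : Nat) : Int) := by push_cast; ring
        rw [hlen', hcast]
        apply ih
        · simp only [List.length_append, List.length_cons, List.length_dropLast, hplen]; omega
        · simp only [List.length_append, List.length_cons, List.length_dropLast, hplen]; omega
        · have ht : (p ++ lowc c :: r).take (i + 1) = p ++ [lowc c] := by
            rw [← hplen]; exact take_mid p (lowc c) r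
          rw [ht]
          exact cleanPre_append_letter hc (lowc c) hL
        · intro hends
          exfalso
          have ht : (p ++ lowc c :: r).take (i + 1) = p ++ [lowc c] := by
            rw [← hplen]; exact take_mid p (lowc c) r
          rw [ht, List.getLast?_concat] at hends
          have : lowc c = '_' := by injection hends
          rw [this, toNat_und] at hL
          omega
      · -- the character becomes an underscore
        have hclsu : cls c = '_' := cls_und_of_not_letter c hL
        by_cases hi0 : i = 0
        · -- leading-underscore path
          have hpnil : p = [] := by rw [hp, hi0, List.take_zero]
          have hund : stepUnd (stepLower s ↑i) (↑s.length) ↑i = some ('_' :: r, (s.length : Int), 0) := by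
            rw [hlow, hpnil, List.nil_append]
            have h0 : ((i : Nat) : Int) = (0 : Int) := by rw [hi0]; rfl
            rw [h0]
            exact stepUnd_i0 (lowc c) r _ (by omega)
          by_cases hone : s.length = 1
          · rw [icLoop_early n s _ _ hguard (icBody_eq_early hund (stepLead_pop_end r _ (by omega)))]
            have hrnil : r = [] := by
              refine List.length_eq_zero_iff.mp ?_
              omega
            have hbc : bCore s = [] := by
              rw [hsdec, hpnil, hrnil, List.nil_append]
              have h1 : bCore [c] = bCore ['_'] := bCore_mid_cls [] c '_' [] (by rw [hclsu]; rfl)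
              rw [h1]
              decide
            rw [hbc]
            rfl
          · rw [icLoop_step n s _ _ hguard ((icBody_eq hund (stepLead_pop r _ (by omega))).trans
              (stepTrail_skip _ _ _ (by omega)))]
            have hres : bCore r = bCore s := by
              conv_rhs => rw [hsdec, hpnil, List.nil_append]
              have h1 : bCore (c :: r) = bCore ('_' :: r) := bCore_mid_cls [] c '_' r (by rw [hclsu]; rfl)
              rw [h1, bCore_cons_und]
            rw [← hres]
            have hrlen : ((s.length : Int) - 1) = ((r.length : Nat) : Int) := by
              push_cast; omega
            have hneg : ((-1 : Int) + 1) = (((0 : Nat) : Nat) : Int) := by norm_num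
            rw [hrlen, hneg]
            apply ih
            · omega
            · omega
            · simpa using cleanPre_nil
            · intro hends; simp at hends
        · -- i > 0, so p ≠ []
          have hpne : p ≠ [] := by
            intro he
            rw [he] at hplen
            exact hi0 (by simpa using hplen.symm)
          have hL2 : (1 : Int) < (s.length : Int) := by
            have h1i : 1 ≤ i := Nat.one_le_iff_ne_zero.mpr hi0
            push_cast
            omega
          by_cases hdup : p.getLast hpne = '_'
          · -- duplicate-underscore pop
            have hlast? : p.getLast? = some '_' := by
              rw [List.getLast?_eq_getLast hpne, hdup]
            have hund : stepUnd (stepLower s ↑i) (↑s.length) ↑i =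
                some (p ++ r, (s.length : Int) - 1, ((i : Nat) : Int) - 1) := by
              rw [hlow, ← hplen]
              exact stepUnd_dup p (lowc c) r _ (by omega) hpne hL2 hdup
            have hp2 : 2 ≤ p.length := cleanPre_len2 hc hlast?
            have hi2 : 2 ≤ i := hplen ▸ hp2
            have hlead : stepLead (p ++ r) ((s.length : Int) - 1) (((i : Nat) : Int) - 1) =
                some (.inr (p ++ r, (s.length : Int) - 1, ((i : Nat) : Int) - 1)) :=
              stepLead_skip _ _ _ (by push_cast; omega)
            by_cases hrnil : r = []
            · -- followed by the trailing-underscore pop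
              have hpdec : p.dropLast ++ ['_'] = p := by
                conv_rhs => rw [← List.dropLast_append_getLast hpne, hdup]
              have hslen1 : s.length = i + 1 := by rw [hslen, hrnil]; simp
              have hdllen : ((p.dropLast.length : Nat) : Int) = ((i : Nat) : Int) - 1 := by
                simp [List.length_dropLast, hplen]
                push_cast
                omega
              have htr : stepTrail (p ++ r) ((s.length : Int) - 1) (((i : Nat) : Int) - 1) =
                  some (.inr (p.dropLast, (s.length : Int) - 1 - 1, ((i : Nat) : Int) - 1 - 2)) := by
                rw [hrnil, List.append_nil]
                conv_lhs => rw [← hpdec, ← hdllen]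
                rw [stepTrail_pop p.dropLast _ (by rw [hdllen]; push_cast; omega)
                  (by push_cast; omega)]
                rw [hdllen]
              rw [icLoop_step n s _ _ hguard ((icBody_eq hund hlead).trans htr)]
              have hres : bCore p.dropLast = bCore s := by
                conv_rhs => rw [hsdec, hrnil]
                have h1 : bCore (p ++ [c]) = bCore (p ++ ['_']) := bCore_mid_cls p c '_' [] (by rw [hclsu]; rfl)
                rw [h1, bCore_snoc_und]
                conv_rhs => rw [← hpdec, bCore_snoc_und]
              rw [← hres]
              have e1 : (s.length : Int) - 1 - 1 = ((p.dropLast.length : Nat) : Int) := by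
                simp [List.length_dropLast, hplen]
                push_cast
                omega
              have e2 : (((i : Nat) : Int) - 1 - 2 + 1) = ((i - 2 : Nat) : Int) := by
                push_cast [hi2]
                omega
              rw [e1, e2]
              apply ih
              · simp only [List.length_append, List.length_cons, List.length_dropLast, hplen]; omega
              · simp only [List.length_append, List.length_cons, List.length_dropLast, hplen]; omega
              · exact cleanPre_of_prefix ((List.take_prefix _ _).trans (List.dropLast_prefix p)) hc
              · intro _
                simp [List.length_dropLast, hplen]
                omega
            · -- more input to the right
              have hrlen0 : r.length ≠ 0 := fun h => hrnil (List.length_eq_zero_iff.mp h)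
              have htr : stepTrail (p ++ r) ((s.length : Int) - 1) (((i : Nat) : Int) - 1) =
                  some (.inr (p ++ r, (s.length : Int) - 1, ((i : Nat) : Int) - 1)) :=
                stepTrail_skip _ _ _ (by push_cast; omega)
              rw [icLoop_step n s _ _ hguard ((icBody_eq hund hlead).trans htr)]
              have hres : bCore (p ++ r) = bCore s := by
                conv_rhs => rw [hsdec]
                have h1 : bCore (p ++ c :: r) = bCore (p ++ '_' :: r) := bCore_mid_cls p c '_' r (by rw [hclsu]; rfl)
                rw [h1, bCore_mid_dup p r hc hlast?]
              rw [← hres]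
              have e1 : (s.length : Int) - 1 = (((p ++ r).length : Nat) : Int) := by
                simp [hplen]
                push_cast
                omega
              have e2 : (((i : Nat) : Int) - 1 + 1) = ((i : Nat) : Int) := by ring
              rw [e1, e2]
              apply ih
              · simp only [List.length_append, List.length_cons, List.length_dropLast, hplen]; omega
              · simp only [List.length_append, List.length_cons, List.length_dropLast, hplen]; omega
              · have ht : (p ++ r).take i = p := by rw [← hplen]; exact List.take_left
                rw [ht]
                exact hc
              · intro _
                simp [hplen]
                omega
          · -- no duplicate: '_' stays, maybe trailing pop
            have hlast? : p.getLast? ≠ some '_' := by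
              rw [List.getLast?_eq_getLast hpne]
              intro he
              exact hdup (by injection he)
            have h1i : 1 ≤ i := Nat.one_le_iff_ne_zero.mpr hi0
            have hund : stepUnd (stepLower s ↑i) (↑s.length) ↑i =
                some (p ++ '_' :: r, (s.length : Int), ((i : Nat) : Int)) := by
              rw [hlow, ← hplen]
              exact stepUnd_nodup p (lowc c) r _ (by omega) hpne hL2 hdup
            have hlead : stepLead (p ++ '_' :: r) ((s.length : Int)) ((i : Nat) : Int) =
                some (.inr (p ++ '_' :: r, (s.length : Int), ((i : Nat) : Int))) :=
              stepLead_skip _ _ _ (by exact_mod_cast hi0)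
            by_cases hrnil : r = []
            · -- trailing pop: drop the '_' just written
              have hslen1 : s.length = i + 1 := by rw [hslen, hrnil]; simp
              have htr : stepTrail (p ++ '_' :: r) ((s.length : Int)) ((i : Nat) : Int) =
                  some (.inr (p, (s.length : Int) - 1, ((i : Nat) : Int) - 2)) := by
                rw [hrnil]
                have hsing : p ++ '_' :: ([] : List Char) = p ++ ['_'] := rfl
                rw [hsing, ← hplen]
                exact stepTrail_pop p _ (by push_cast [hplen]; omega) (by push_cast; omega)
              rw [icLoop_step n s _ _ hguard ((icBody_eq hund hlead).trans htr)]
              have hres : bCore p = bCore s := by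
                conv_rhs => rw [hsdec, hrnil]
                have h1 : bCore (p ++ [c]) = bCore (p ++ ['_']) := bCore_mid_cls p c '_' [] (by rw [hclsu]; rfl)
                rw [h1, bCore_snoc_und]
              rw [← hres]
              have e1 : (s.length : Int) - 1 = ((p.length : Nat) : Int) := by
                push_cast [hplen]
                omega
              have e2 : (((i : Nat) : Int) - 2 + 1) = ((i - 1 : Nat) : Int) := by
                push_cast [h1i]
                omega
              rw [e1, e2]
              apply ih
              · rw [hplen]; omega
              · rw [hplen]; omega
              · exact cleanPre_of_prefix (List.take_prefix _ _) hc
              · intro _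
                rw [hplen]
                omega
            · have hrlen0 : r.length ≠ 0 := fun h => hrnil (List.length_eq_zero_iff.mp h)
              have htr : stepTrail (p ++ '_' :: r) ((s.length : Int)) ((i : Nat) : Int) =
                  some (.inr (p ++ '_' :: r, (s.length : Int), ((i : Nat) : Int))) := by
                refine stepTrail_skip _ _ _ ?_
                push_cast
                omega
              rw [icLoop_step n s _ _ hguard ((icBody_eq hund hlead).trans htr)]
              have hres : bCore (p ++ '_' :: r) = bCore s := by
                conv_rhs => rw [hsdec]
                exact (bCore_mid_cls p c '_' r (by rw [hclsu]; rfl)).symm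
              rw [← hres]
              have e1 : (s.length : Int) = (((p ++ '_' :: r).length : Nat) : Int) := by
                simp [hplen]
                push_cast
                omega
              have e2 : (((i : Nat) : Int) + 1) = ((i + 1 : Nat) : Int) := by push_cast; ring
              rw [e1, e2]
              apply ih
              · simp only [List.length_append, List.length_cons, List.length_dropLast, hplen]; omega
              · simp only [List.length_append, List.length_cons, List.length_dropLast, hplen]; omega
              · have ht : (p ++ '_' :: r).take (i + 1) = p ++ ['_'] := by
                  rw [← hplen]; exact take_mid p '_' r
                rw [ht]
                exact cleanPre_append_und hc hpne hlast?
              · intro _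
                simp [hplen]
                omega

-- ===== VERDICT (by name: the statement is the Claim_ definition above) =====
theorem input_cleanup_spec : Claim_equal_input_cleanup := by
  intro s _
  unfold Spec_input_cleanup input_cleanup input_cleanup_alt pyLenPort
  rw [len_foldl]
  have : (0 : Int) + (s.toList.length : Int) = (s.toList.length : Int) := by ring
  rw [this]
  have h0 : ((0 : Nat) : Int) = (0 : Int) := rfl
  rw [← h0]
  exact loop_eq (2 * s.toList.length + 1) s.toList 0 (by omega) (by omega)
    (by simpa using cleanPre_nil) (by intro h; simp at h)
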